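-- pv_equiv track=rewrite | github.com/pietrondo/pietrom | src/game/world/autotiling.py | create_test_pattern
-- ===== SOURCE A (Python) =====
-- from typing import List, Dict, Tuple, Optional
--
-- def create_test_pattern(width: int, height: int) -> List[List[bool]]:
--     """Crea un pattern di test per verificare l'autotiling"""
--     grid = [[False for _ in range(width)] for _ in range(height)]
--
--     # Crea un rettangolo con alcuni buchi per testare tutti i casi
--     for y in range(2, height - 2):
--         for x in range(2, width - 2):
--             grid[y][x] = True
--
--     # Aggiungi alcuni pattern specifici
--     if width > 10 and height > 10:
--         # Rimuovi alcuni tile per creare angoli interni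
--         grid[4][4] = False
--         grid[4][width-5] = False
--         grid[height-5][4] = False
--         grid[height-5][width-5] = False
--
--         # Aggiungi alcune protuberanze per T-junction
--         if height > 15:
--             for x in range(width//2 - 2, width//2 + 3):
--                 grid[height//2][x] = True
--             for y in range(height//2 - 2, height//2 + 3):
--                 grid[y][width//2] = True
--
--     return grid
-- ===== SOURCE B (Python) =====
-- def create_test_pattern(width, height):
--     """Row-oriented construction: each row is built whole from runs chosen by its y,
--     instead of zero-filling a grid and mutating it cell by cell in three passes."""
--     special = width > 10 and height > 10
--     arms = special and height > 15
--     grid = []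
--     for y in range(height):
--         if 2 <= y < height - 2 and width >= 4:
--             row = [False, False] + [True] * (width - 4) + [False, False]
--         else:
--             row = [False] * width
--         if special and (y == 4 or y == height - 5):
--             row[4] = False
--             row[width - 5] = False
--         if arms:
--             if y == height // 2:
--                 for x in range(width // 2 - 2, width // 2 + 3):
--                     row[x] = True
--             elif height // 2 - 2 <= y <= height // 2 + 2:
--                 row[width // 2] = True
--         grid.append(row)
--     return grid
-- ===== Notes on version B (the rewrite author's own statement) =====
-- stated objective: faster
-- what changed: B builds each row whole from runs ([False]*k / [True]*k concatenations) chosen by the row's y, with a few per-row pokes for holes and cross arms, instead of zero-filling the grid and then mutating it cell by cell in three passes.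
import Mathlib
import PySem

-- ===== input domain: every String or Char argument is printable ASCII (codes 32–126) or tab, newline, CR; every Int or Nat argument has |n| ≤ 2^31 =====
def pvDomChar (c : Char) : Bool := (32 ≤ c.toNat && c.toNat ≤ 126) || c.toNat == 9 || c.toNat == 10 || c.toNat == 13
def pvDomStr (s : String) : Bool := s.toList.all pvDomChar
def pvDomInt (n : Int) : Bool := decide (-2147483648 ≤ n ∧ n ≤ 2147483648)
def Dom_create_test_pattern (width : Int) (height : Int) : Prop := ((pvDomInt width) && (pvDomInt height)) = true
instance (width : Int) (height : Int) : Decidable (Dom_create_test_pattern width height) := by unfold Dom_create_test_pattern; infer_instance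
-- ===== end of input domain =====

-- B builds each row whole from runs chosen by its y (with a few per-row pokes) instead of
-- zero-filling the grid and mutating it cell by cell in three passes.

-- ===== PORT A =====
-- grid[y][x] = v  (Python list assignment; in A every index is in range, so the total form pySetD is exact)
def pvSet2 (g : List (List Bool)) (y x : Int) (v : Bool) : List (List Bool) :=
  PySem.List.pySetD g y (PySem.List.pySetD (PySem.List.pyGetD g y []) x v)

def create_test_pattern (width : Int) (height : Int) : List (List Bool) :=
  let grid := (PySem.List.pyRange 0 height 1).map
    (fun _ => (PySem.List.pyRange 0 width 1).map (fun _ => false))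
  let grid := (PySem.List.pyRange 2 (height - 2) 1).foldl
    (fun g y => (PySem.List.pyRange 2 (width - 2) 1).foldl (fun g x => pvSet2 g y x true) g) grid
  if 10 < width ∧ 10 < height then
    let grid := pvSet2 grid 4 4 false
    let grid := pvSet2 grid 4 (width - 5) false
    let grid := pvSet2 grid (height - 5) 4 false
    let grid := pvSet2 grid (height - 5) (width - 5) false
    if 15 < height then
      let grid := (PySem.List.pyRange (PySem.Int.floordiv width 2 - 2) (PySem.Int.floordiv width 2 + 3) 1).foldl
        (fun g x => pvSet2 g (PySem.Int.floordiv height 2) x true) grid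
      (PySem.List.pyRange (PySem.Int.floordiv height 2 - 2) (PySem.Int.floordiv height 2 + 3) 1).foldl
        (fun g y => pvSet2 g y (PySem.Int.floordiv width 2) true) grid
    else grid
  else grid

-- ===== PORT B =====
def create_test_pattern_alt (width : Int) (height : Int) : List (List Bool) :=
  let special := 10 < width ∧ 10 < height
  let arms := special ∧ 15 < height
  (PySem.List.pyRange 0 height 1).foldl (fun grid y =>
    let row :=
      if 2 ≤ y ∧ y < height - 2 ∧ 4 ≤ width then
        [false, false] ++ List.replicate (width - 4).toNat true ++ [false, false]
      else
        List.replicate width.toNat false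
    let row :=
      if special ∧ (y = 4 ∨ y = height - 5) then
        PySem.List.pySetD (PySem.List.pySetD row 4 false) (width - 5) false
      else row
    let row :=
      if arms then
        if y = PySem.Int.floordiv height 2 then
          (PySem.List.pyRange (PySem.Int.floordiv width 2 - 2) (PySem.Int.floordiv width 2 + 3) 1).foldl
            (fun r x => PySem.List.pySetD r x true) row
        else if PySem.Int.floordiv height 2 - 2 ≤ y ∧ y ≤ PySem.Int.floordiv height 2 + 2 then
          PySem.List.pySetD row (PySem.Int.floordiv width 2) true
        else row
      else row
    grid ++ [row]) []

-- ===== PRECONDITION & SPEC =====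
def Spec_create_test_pattern (width : Int) (height : Int) (out : List (List Bool)) : Prop := out = create_test_pattern_alt width height
instance (width : Int) (height : Int) (out : List (List Bool)) : Decidable (Spec_create_test_pattern width height out) := by unfold Spec_create_test_pattern; infer_instance

-- ===== CLAIM (what is proved, stated in full; the proofs are below) =====
def Claim_equal_create_test_pattern : Prop := ∀ (width : Int) (height : Int), Dom_create_test_pattern width height → Spec_create_test_pattern width height (create_test_pattern width height)

-- ===== LEMMAS AND PROOFS =====

theorem pv_set_map_pyRange {α : Type} (w : Int) (g : Int → α) (x : Int) (v : α)
    (hx0 : 0 ≤ x) :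
    ((PySem.List.pyRange 0 w 1).map g).set x.toNat v
      = (PySem.List.pyRange 0 w 1).map (fun x' => if x' = x then v else g x') := by
  apply List.ext_getElem
  · simp
  · intro i h1 h2
    rw [List.getElem_set]
    simp only [List.getElem_map, PySem.List.getElem_pyRange_one]
    have hi : (0 : Int) + i = (i : Int) := by omega
    by_cases hc : x.toNat = i
    · simp [hc, hi]; intro hne; omega
    · simp [hc, hi]; intro he; omega

def pvMk (w h : Int) (f : Int → Int → Bool) : List (List Bool) :=
  (PySem.List.pyRange 0 h 1).map (fun y => (PySem.List.pyRange 0 w 1).map (fun x => f y x))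

theorem pvSet2_mk {w h : Int} (f : Int → Int → Bool) {y x : Int} (v : Bool)
    (hy0 : 0 ≤ y) (hyh : y < h) (hx0 : 0 ≤ x) :
    pvSet2 (pvMk w h f) y x v
      = pvMk w h (fun y' x' => if y' = y ∧ x' = x then v else f y' x') := by
  unfold pvSet2 pvMk
  rw [PySem.List.pyGetD_map_pyRange_of_nonneg _ _ _ _ hy0 hyh,
      PySem.List.pySetD_of_nonneg _ _ hx0, PySem.List.pySetD_of_nonneg _ _ hy0,
      pv_set_map_pyRange w (fun x' => f y x') x v hx0,
      pv_set_map_pyRange h (fun y' => (PySem.List.pyRange 0 w 1).map (fun x' => f y' x')) y _ hy0]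
  refine List.map_congr_left (fun y' hy' => ?_)
  by_cases hyy : y' = y
  · subst hyy
    rw [if_pos rfl]
    refine List.map_congr_left (fun x' hx' => ?_)
    by_cases hxx : x' = x <;> simp [hxx]
  · simp only [if_neg hyy]
    refine List.map_congr_left (fun x' hx' => ?_)
    rw [if_neg (by tauto)]

theorem pvMk_congr {w h : Int} {f g : Int → Int → Bool}
    (hfg : ∀ y x, 0 ≤ y → y < h → 0 ≤ x → x < w → f y x = g y x) :
    pvMk w h f = pvMk w h g := by
  unfold pvMk
  refine List.map_congr_left (fun y hy => ?_)
  rw [PySem.List.mem_pyRange_one] at hy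
  refine List.map_congr_left (fun x hx => ?_)
  rw [PySem.List.mem_pyRange_one] at hx
  exact hfg y x hy.1 hy.2 hx.1 hx.2

theorem pvFoldRow_mk {w h : Int} {y : Int}
    (hy0 : 0 ≤ y) (hyh : y < h) :
    ∀ (n : Nat) (a b : Int) (f : Int → Int → Bool), (b - a).toNat = n → 0 ≤ a → b ≤ w →
    (PySem.List.pyRange a b 1).foldl (fun g x => pvSet2 g y x true) (pvMk w h f)
      = pvMk w h (fun y' x' => if y' = y ∧ a ≤ x' ∧ x' < b then true else f y' x') := by
  intro n
  induction n with
  | zero =>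
    intro a b f hn ha hb
    rw [PySem.List.pyRange_one_eq_nil (by omega)]
    simp only [List.foldl_nil]
    exact pvMk_congr (fun y' x' _ _ _ _ => by rw [if_neg (by omega)])
  | succ k ih =>
    intro a b f hn ha hb
    rw [PySem.List.pyRange_one_cons (by omega)]
    simp only [List.foldl_cons]
    rw [pvSet2_mk f true hy0 hyh ha,
        ih (a + 1) b _ (by omega) (by omega) hb]
    exact pvMk_congr (fun y' x' _ _ _ _ => by
      by_cases h1 : y' = y ∧ a + 1 ≤ x' ∧ x' < b
      · rw [if_pos h1, if_pos (by omega)]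
      · rw [if_neg h1]
        by_cases h2 : y' = y ∧ x' = a
        · rw [if_pos h2, if_pos (by omega)]
        · rw [if_neg h2, if_neg (by omega)])

theorem pvFoldCol_mk {w h : Int} {x : Int}
    (hx0 : 0 ≤ x) :
    ∀ (n : Nat) (a b : Int) (f : Int → Int → Bool), (b - a).toNat = n → 0 ≤ a → b ≤ h →
    (PySem.List.pyRange a b 1).foldl (fun g y => pvSet2 g y x true) (pvMk w h f)
      = pvMk w h (fun y' x' => if x' = x ∧ a ≤ y' ∧ y' < b then true else f y' x') := by
  intro n
  induction n with
  | zero =>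
    intro a b f hn ha hb
    rw [PySem.List.pyRange_one_eq_nil (by omega)]
    simp only [List.foldl_nil]
    exact pvMk_congr (fun y' x' _ _ _ _ => by rw [if_neg (by omega)])
  | succ k ih =>
    intro a b f hn ha hb
    rw [PySem.List.pyRange_one_cons (by omega)]
    simp only [List.foldl_cons]
    rw [pvSet2_mk f true ha (by omega) hx0,
        ih (a + 1) b _ (by omega) (by omega) hb]
    exact pvMk_congr (fun y' x' _ _ _ _ => by
      by_cases h1 : x' = x ∧ a + 1 ≤ y' ∧ y' < b
      · rw [if_pos h1, if_pos (by omega)]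
      · rw [if_neg h1]
        by_cases h2 : y' = a ∧ x' = x
        · rw [if_pos h2, if_pos (by omega)]
        · rw [if_neg h2, if_neg (by omega)])

theorem pvFoldRect_mk {w h : Int} :
    ∀ (n : Nat) (c d : Int) (f : Int → Int → Bool), (d - c).toNat = n → 0 ≤ c → d ≤ h →
    (PySem.List.pyRange c d 1).foldl
        (fun g y => (PySem.List.pyRange 2 (w - 2) 1).foldl (fun g x => pvSet2 g y x true) g)
        (pvMk w h f)
      = pvMk w h (fun y' x' => if (c ≤ y' ∧ y' < d) ∧ 2 ≤ x' ∧ x' < w - 2 then true else f y' x') := by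
  intro n
  induction n with
  | zero =>
    intro c d f hn hc hd
    rw [PySem.List.pyRange_one_eq_nil (a := c) (b := d) (by omega)]
    simp only [List.foldl_nil]
    exact pvMk_congr (fun y' x' _ _ _ _ => by rw [if_neg (by omega)])
  | succ k ih =>
    intro c d f hn hc hd
    rw [PySem.List.pyRange_one_cons (a := c) (b := d) (by omega)]
    simp only [List.foldl_cons]
    rw [pvFoldRow_mk hc (by omega) (w - 2 - 2).toNat 2 (w - 2) f rfl (by omega) (by omega),
        ih (c + 1) d _ (by omega) (by omega) hd]
    exact pvMk_congr (fun y' x' _ _ _ _ => by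
      by_cases h1 : (c + 1 ≤ y' ∧ y' < d) ∧ 2 ≤ x' ∧ x' < w - 2
      · rw [if_pos h1, if_pos (by omega)]
      · rw [if_neg h1]
        by_cases h2 : y' = c ∧ 2 ≤ x' ∧ x' < w - 2
        · rw [if_pos h2, if_pos (by omega)]
        · rw [if_neg h2, if_neg (by omega)])


theorem pv_foldl_append {α β : Type} (f : α → β) :
    ∀ (L : List α) (acc : List β), L.foldl (fun acc y => acc ++ [f y]) acc = acc ++ L.map f := by
  intro L
  induction L with
  | nil => simp
  | cons a t ih => intro acc; simp [ih]

theorem pv_replicate_map (w : Int) (c : Bool) :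
    List.replicate w.toNat c = (PySem.List.pyRange 0 w 1).map (fun _ => c) := by
  apply List.ext_getElem
  · simp [PySem.List.length_pyRange_one]
  · intro i h1 h2; simp

theorem pv_interior_row (w : Int) (hw : 4 ≤ w) :
    [false, false] ++ List.replicate (w - 4).toNat true ++ [false, false]
      = (PySem.List.pyRange 0 w 1).map (fun x => decide (2 ≤ x ∧ x < w - 2)) := by
  apply List.ext_getElem
  · simp [PySem.List.length_pyRange_one]; omega
  · intro i h1 h2
    simp only [List.getElem_map, PySem.List.getElem_pyRange_one]
    simp only [show ([false, false] : List Bool) = List.replicate 2 false from rfl] at h1 ⊢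
    simp only [List.length_append, List.length_replicate,
      PySem.List.length_pyRange_one, List.length_map] at h1 h2
    by_cases hi2 : i < 2
    · rw [List.getElem_append_left (by simp; omega), List.getElem_append_left (by simp; omega),
          List.getElem_replicate]
      rw [eq_comm]; simp only [decide_eq_false_iff_not]; omega
    · by_cases hiw : i < 2 + (w - 4).toNat
      · rw [List.getElem_append_left (by simp; omega), List.getElem_append_right (by simp; omega),
            List.getElem_replicate]
        rw [eq_comm]; simp only [decide_eq_true_eq]; omega
      · rw [List.getElem_append_right (by simp; omega), List.getElem_replicate]
        rw [eq_comm]; simp only [decide_eq_false_iff_not]; omega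

theorem pvFoldSet1 {w : Int} (g : Int → Bool) :
    ∀ (n : Nat) (a b : Int), (b - a).toNat = n → 0 ≤ a →
    (PySem.List.pyRange a b 1).foldl (fun r x => PySem.List.pySetD r x true)
        ((PySem.List.pyRange 0 w 1).map g)
      = (PySem.List.pyRange 0 w 1).map (fun x' => if a ≤ x' ∧ x' < b then true else g x') := by
  intro n
  induction n generalizing g with
  | zero =>
    intro a b hn ha
    rw [PySem.List.pyRange_one_eq_nil (a := a) (b := b) (by omega)]
    simp only [List.foldl_nil]
    refine List.map_congr_left (fun x hx => ?_)
    rw [if_neg (by omega)]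
  | succ k ih =>
    intro a b hn ha
    rw [PySem.List.pyRange_one_cons (a := a) (b := b) (by omega)]
    simp only [List.foldl_cons]
    rw [PySem.List.pySetD_of_nonneg _ _ ha, pv_set_map_pyRange w g a true ha,
        ih _ (a + 1) b (by omega) (by omega)]
    refine List.map_congr_left (fun x hx => ?_)
    by_cases h1 : a + 1 ≤ x ∧ x < b
    · rw [if_pos h1, if_pos (by omega)]
    · rw [if_neg h1]
      by_cases h2 : x = a
      · rw [if_pos h2, if_pos (by omega)]
      · rw [if_neg h2, if_neg (by omega)]

theorem pvS0 (width height y : Int) :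
    (if 2 ≤ y ∧ y < height - 2 ∧ 4 ≤ width then
        [false, false] ++ List.replicate (width - 4).toNat true ++ [false, false]
      else List.replicate width.toNat false)
      = (PySem.List.pyRange 0 width 1).map
          (fun x => decide (2 ≤ y ∧ y < height - 2 ∧ 2 ≤ x ∧ x < width - 2)) := by
  split_ifs with hc
  · rw [pv_interior_row width hc.2.2]
    refine List.map_congr_left (fun x hx => ?_)
    rw [PySem.List.mem_pyRange_one] at hx
    rw [eq_comm]; simp only [decide_eq_decide]; omega
  · rw [pv_replicate_map]
    refine List.map_congr_left (fun x hx => ?_)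
    rw [PySem.List.mem_pyRange_one] at hx
    rw [eq_comm]; simp only [decide_eq_false_iff_not]; omega

theorem pvS1 (width height y : Int) (g : Int → Bool) :
    (if (10 < width ∧ 10 < height) ∧ (y = 4 ∨ y = height - 5) then
        PySem.List.pySetD (PySem.List.pySetD ((PySem.List.pyRange 0 width 1).map g) 4 false)
          (width - 5) false
      else (PySem.List.pyRange 0 width 1).map g)
      = (PySem.List.pyRange 0 width 1).map
          (fun x => if (10 < width ∧ 10 < height) ∧ (y = 4 ∨ y = height - 5) ∧ (x = 4 ∨ x = width - 5)
            then false else g x) := by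
  split_ifs with hc
  · rw [PySem.List.pySetD_of_nonneg _ _ (by omega : (0:Int) ≤ 4),
        pv_set_map_pyRange width g 4 false (by omega),
        PySem.List.pySetD_of_nonneg _ _ (by omega : (0:Int) ≤ width - 5),
        pv_set_map_pyRange width _ (width - 5) false (by omega)]
    refine List.map_congr_left (fun x hx => ?_)
    by_cases h1 : x = width - 5
    · rw [if_pos h1, if_pos ⟨hc.1, hc.2, Or.inr h1⟩]
    · rw [if_neg h1]
      by_cases h2 : x = 4
      · rw [if_pos h2, if_pos ⟨hc.1, hc.2, Or.inl h2⟩]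
      · rw [if_neg h2, if_neg (by tauto)]
  · refine List.map_congr_left (fun x hx => ?_)
    rw [if_neg (by tauto)]

theorem pvS2 (width height y : Int) (g : Int → Bool) :
    (if (10 < width ∧ 10 < height) ∧ 15 < height then
        if y = height / 2 then
          (PySem.List.pyRange (width / 2 - 2) (width / 2 + 3) 1).foldl
            (fun r x => PySem.List.pySetD r x true) ((PySem.List.pyRange 0 width 1).map g)
        else if height / 2 - 2 ≤ y ∧ y ≤ height / 2 + 2 then
          PySem.List.pySetD ((PySem.List.pyRange 0 width 1).map g) (width / 2) true
        else (PySem.List.pyRange 0 width 1).map g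
      else (PySem.List.pyRange 0 width 1).map g)
      = (PySem.List.pyRange 0 width 1).map
          (fun x => if ((10 < width ∧ 10 < height) ∧ 15 < height) ∧
              (y = height / 2 ∧ width / 2 - 2 ≤ x ∧ x < width / 2 + 3 ∨
               ¬(y = height / 2) ∧ (height / 2 - 2 ≤ y ∧ y ≤ height / 2 + 2) ∧ x = width / 2)
            then true else g x) := by
  split_ifs with hc h1 h2
  · rw [pvFoldSet1 g (width / 2 + 3 - (width / 2 - 2)).toNat _ _ rfl (by omega)]
    refine List.map_congr_left (fun x hx => ?_)
    by_cases hx1 : width / 2 - 2 ≤ x ∧ x < width / 2 + 3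
    · rw [if_pos hx1, if_pos ⟨hc, Or.inl ⟨h1, hx1⟩⟩]
    · rw [if_neg hx1, if_neg (by tauto)]
  · rw [PySem.List.pySetD_of_nonneg _ _ (by omega : (0:Int) ≤ width / 2),
        pv_set_map_pyRange width g (width / 2) true (by omega)]
    refine List.map_congr_left (fun x hx => ?_)
    by_cases hx1 : x = width / 2
    · rw [if_pos hx1, if_pos ⟨hc, Or.inr ⟨h1, h2, hx1⟩⟩]
    · rw [if_neg hx1, if_neg (by tauto)]
  · refine List.map_congr_left (fun x hx => ?_)
    rw [if_neg (by tauto)]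
  · refine List.map_congr_left (fun x hx => ?_)
    rw [if_neg (by tauto)]

-- ===== VERDICT (by name: the statement is the Claim_ definition above) =====
set_option maxHeartbeats 2000000 in
theorem create_test_pattern_spec : Claim_equal_create_test_pattern := by
  unfold Claim_equal_create_test_pattern
  intro width height _hdom
  unfold Spec_create_test_pattern create_test_pattern create_test_pattern_alt
  dsimp only
  have h0 : (PySem.List.pyRange 0 height 1).map
      (fun _ => (PySem.List.pyRange 0 width 1).map (fun _ => false))
      = pvMk width height (fun _ _ => false) := rfl
  rw [h0, pvFoldRect_mk (height - 2 - 2).toNat 2 (height - 2) _ rfl (by omega) (by omega),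
      pv_foldl_append, List.nil_append]
  have hfw : PySem.Int.floordiv width 2 = width / 2 := PySem.Int.floordiv_eq_ediv_of_pos (by omega)
  have hfh : PySem.Int.floordiv height 2 = height / 2 := PySem.Int.floordiv_eq_ediv_of_pos (by omega)
  rw [hfw, hfh]
  simp only [pvS0, pvS1, pvS2]
  by_cases hw : 10 < width ∧ 10 < height
  · obtain ⟨hw1, hh1⟩ := hw
    rw [if_pos ⟨hw1, hh1⟩,
        pvSet2_mk _ false (by omega) (by omega) (by omega),
        pvSet2_mk _ false (by omega) (by omega) (by omega),
        pvSet2_mk _ false (by omega) (by omega) (by omega),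
        pvSet2_mk _ false (by omega) (by omega) (by omega)]
    by_cases hh : 15 < height
    · rw [if_pos hh,
          pvFoldRow_mk (by omega) (by omega) (width / 2 + 3 - (width / 2 - 2)).toNat
            (width / 2 - 2) (width / 2 + 3) _ rfl (by omega) (by omega),
          pvFoldCol_mk (by omega) (height / 2 + 3 - (height / 2 - 2)).toNat
            (height / 2 - 2) (height / 2 + 3) _ rfl (by omega) (by omega)]
      unfold pvMk
      refine List.map_congr_left (fun y hy => ?_)
      rw [PySem.List.mem_pyRange_one] at hy
      refine List.map_congr_left (fun x hx => ?_)
      rw [PySem.List.mem_pyRange_one] at hx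
      dsimp only
      split_ifs <;> first | rfl | omega |
        (rw [eq_comm]; simp only [decide_eq_true_eq, decide_eq_false_iff_not]; omega)
    · rw [if_neg hh]
      unfold pvMk
      refine List.map_congr_left (fun y hy => ?_)
      rw [PySem.List.mem_pyRange_one] at hy
      refine List.map_congr_left (fun x hx => ?_)
      rw [PySem.List.mem_pyRange_one] at hx
      dsimp only
      split_ifs <;> first | rfl | omega |
        (rw [eq_comm]; simp only [decide_eq_true_eq, decide_eq_false_iff_not]; omega)
  · rw [if_neg hw]
    unfold pvMk
    refine List.map_congr_left (fun y hy => ?_)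
    rw [PySem.List.mem_pyRange_one] at hy
    refine List.map_congr_left (fun x hx => ?_)
    rw [PySem.List.mem_pyRange_one] at hx
    dsimp only
    split_ifs <;> first | rfl | omega |
      (rw [eq_comm]; simp only [decide_eq_true_eq, decide_eq_false_iff_not]; omega)
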